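-- pv_equiv track=rewrite | github.com/GreshaaRampal/Questions | EncodedString.py | parse_encoded_string
-- ===== SOURCE A (Python) =====
-- def parse_encoded_string(encoded_string):
--     # Initialize variables to store the parsed values
--     first_name = ""
--     last_name = ""
--     id = ""
--
--     # Split the encoded string by consecutive zeros
--     parts = encoded_string.split('0')
--
--     # Iterate through the parts to extract values
--     for part in parts:
--         if part:
--             # If part is not empty, check if it contains only digits (ID)
--             if part.isdigit():
--                 id = part
--             # If it's not all digits, it's either the first or last name
--             elif not first_name:
--                 first_name = part
--             else:
--                 last_name = part
--
--     # Create and return the dictionary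
--     result = {
--         "first_name": first_name,
--         "last_name": last_name,
--         "id": id
--     }
--
--     return result
-- ===== SOURCE B (Python) =====
-- def parse_encoded_string(encoded_string):
--     # Partition-then-select decomposition instead of a stateful loop.
--     parts = [p for p in encoded_string.split('0') if p]
--     names = [p for p in parts if not p.isdigit()]
--     ids = [p for p in parts if p.isdigit()]
--     return {
--         "first_name": names[0] if names else "",
--         "last_name": names[-1] if len(names) > 1 else "",
--         "id": ids[-1] if ids else "",
--     }
-- ===== Notes on version B (the rewrite author's own statement) =====
-- stated objective: simpler
-- what changed: Replaces A's single stateful loop (empty-first_name flag, three mutable slots) by a partition-then-select decomposition: filter the non-empty parts, partition them into name parts and digit parts, and pick first/last elements by indexing.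
import Mathlib
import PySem

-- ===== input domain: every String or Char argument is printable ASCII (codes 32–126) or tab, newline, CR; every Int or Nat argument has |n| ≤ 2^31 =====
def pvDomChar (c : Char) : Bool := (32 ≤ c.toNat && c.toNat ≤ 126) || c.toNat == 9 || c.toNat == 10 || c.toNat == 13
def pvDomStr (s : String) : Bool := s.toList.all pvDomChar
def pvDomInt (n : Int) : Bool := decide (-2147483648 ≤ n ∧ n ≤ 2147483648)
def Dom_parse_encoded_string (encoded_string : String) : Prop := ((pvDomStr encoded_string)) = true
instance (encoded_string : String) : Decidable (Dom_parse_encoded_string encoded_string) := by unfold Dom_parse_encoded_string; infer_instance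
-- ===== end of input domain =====

-- B replaces A's single stateful loop by a partition-then-select decomposition (objective: simpler).

-- ===== PORT A =====
-- A's loop body: state is (first_name, last_name, id); branches in A's order.
def pvStepA (acc : String × String × String) (part : String) : String × String × String :=
  if part ≠ "" then
    if PySem.Str.strIsdigit part then (acc.1, acc.2.1, part)
    else if acc.1 = "" then (part, acc.2.1, acc.2.2)
    else (acc.1, part, acc.2.2)
  else acc

def parse_encoded_string (encoded_string : String) : List (String × String) :=
  -- parts = encoded_string.split('0'); sep "0" ≠ "" so split? is always some
  let parts := (PySem.Str.split? encoded_string "0").getD []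
  let st := parts.foldl pvStepA ("", "", "")
  -- the dict literal with three distinct keys, in insertion order
  [("first_name", st.1), ("last_name", st.2.1), ("id", st.2.2)]

-- ===== PORT B =====
def parse_encoded_string_alt (encoded_string : String) : List (String × String) :=
  let parts := ((PySem.Str.split? encoded_string "0").getD []).filter (fun p => p ≠ "")
  let names := parts.filter (fun p => !PySem.Str.strIsdigit p)
  let ids := parts.filter (fun p => PySem.Str.strIsdigit p)
  [("first_name", names.headD ""),
   ("last_name", if 1 < names.length then names.getLastD "" else ""),
   ("id", ids.getLastD "")]

-- ===== PRECONDITION & SPEC =====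
def Spec_parse_encoded_string (encoded_string : String) (out : List (String × String)) : Prop := out = parse_encoded_string_alt encoded_string
instance (encoded_string : String) (out : List (String × String)) : Decidable (Spec_parse_encoded_string encoded_string out) := by unfold Spec_parse_encoded_string; infer_instance

-- ===== CLAIM (what is proved, stated in full; the proofs are below) =====
def Claim_equal_parse_encoded_string : Prop := ∀ (encoded_string : String), Dom_parse_encoded_string encoded_string → Spec_parse_encoded_string encoded_string (parse_encoded_string encoded_string)

-- ===== LEMMAS AND PROOFS =====

-- the two partitions of the parts list: non-empty non-digit parts (names), non-empty digit parts (ids)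
def pvIsName (p : String) : Bool := decide (p ≠ "") && !PySem.Str.strIsdigit p
def pvIsId (p : String) : Bool := decide (p ≠ "") && PySem.Str.strIsdigit p
def pvNames (parts : List String) : List String := parts.filter pvIsName
def pvIds (parts : List String) : List String := parts.filter pvIsId

theorem pvStepA_empty (acc : String × String × String) : pvStepA acc "" = acc := by
  unfold pvStepA
  rw [if_neg (by simp)]

theorem pvStepA_digit (fn ln id p : String) (h1 : p ≠ "")
    (h2 : PySem.Str.strIsdigit p = true) : pvStepA (fn, ln, id) p = (fn, ln, p) := by
  unfold pvStepA
  rw [if_pos h1, if_pos h2]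

theorem pvStepA_name_first (fn ln id p : String) (h1 : p ≠ "")
    (h2 : PySem.Str.strIsdigit p = false) (h3 : fn = "") :
    pvStepA (fn, ln, id) p = (p, ln, id) := by
  unfold pvStepA
  rw [if_pos h1, if_neg (fun hc => Bool.false_ne_true (h2.symm.trans hc)), if_pos h3]

theorem pvStepA_name_rest (fn ln id p : String) (h1 : p ≠ "")
    (h2 : PySem.Str.strIsdigit p = false) (h3 : fn ≠ "") :
    pvStepA (fn, ln, id) p = (fn, p, id) := by
  unfold pvStepA
  rw [if_pos h1, if_neg (fun hc => Bool.false_ne_true (h2.symm.trans hc)), if_neg h3]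

-- Invariant of A's fold over an arbitrary parts list, for an arbitrary initial state.
theorem pvFoldA_spec (parts : List String) (fn ln id : String) :
    parts.foldl pvStepA (fn, ln, id) =
      ((if fn = "" then (pvNames parts).headD "" else fn),
       (if fn = "" then (pvNames parts).tail.getLastD ln else (pvNames parts).getLastD ln),
       (pvIds parts).getLastD id) := by
  induction parts generalizing fn ln id with
  | nil => simp [pvNames, pvIds]
  | cons p rest ih =>
    rw [List.foldl_cons]
    by_cases hp : p = ""
    · subst hp
      have h1 : pvNames ("" :: rest) = pvNames rest := by simp [pvNames, pvIsName]
      have h2 : pvIds ("" :: rest) = pvIds rest := by simp [pvIds, pvIsId]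
      rw [pvStepA_empty, ih, h1, h2]
    · by_cases hd : PySem.Str.strIsdigit p
      · have hd' : PySem.Chars.strIsdigit p.toList = true := by simpa using hd
        have h1 : pvNames (p :: rest) = pvNames rest := by
          simp [pvNames, pvIsName, hd']
        have h2 : pvIds (p :: rest) = p :: pvIds rest := by
          simp [pvIds, pvIsId, hp, hd']
        rw [pvStepA_digit fn ln id p hp hd, ih, h1, h2, List.getLastD_cons]
      · rw [Bool.not_eq_true] at hd
        have hd' : PySem.Chars.strIsdigit p.toList = false := by simpa using hd
        have h1 : pvNames (p :: rest) = p :: pvNames rest := by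
          simp [pvNames, pvIsName, hp, hd']
        have h2 : pvIds (p :: rest) = pvIds rest := by
          simp [pvIds, pvIsId, hd']
        by_cases hfn : fn = ""
        · rw [pvStepA_name_first fn ln id p hp hd hfn, ih, h1, h2, if_neg hp, if_neg hp,
            if_pos hfn, if_pos hfn, List.headD_cons, List.tail_cons]
        · rw [pvStepA_name_rest fn ln id p hp hd hfn, ih, h1, h2, if_neg hfn, if_neg hfn,
            if_neg hfn, if_neg hfn, List.getLastD_cons]

-- tail.getLastD "" selects the last element only when there are at least two
theorem pvTail_getLastD (l : List String) :
    l.tail.getLastD "" = (if 1 < l.length then l.getLastD "" else "") := by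
  match l with
  | [] => simp
  | [a] => simp
  | a :: b :: t =>
    rw [List.tail_cons, if_pos (by simp)]
    simp only [List.getLastD_cons]

-- B's two filter-of-filter partitions equal the single combined filters
theorem pvNames_eq (parts : List String) :
    (parts.filter (fun p => p ≠ "")).filter (fun p => !PySem.Str.strIsdigit p)
      = pvNames parts := by
  rw [List.filter_filter, pvNames]
  exact List.filter_congr (fun x _ => by simp [pvIsName, Bool.and_comm])

theorem pvIds_eq (parts : List String) :
    (parts.filter (fun p => p ≠ "")).filter (fun p => PySem.Str.strIsdigit p)
      = pvIds parts := by
  rw [List.filter_filter, pvIds]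
  exact List.filter_congr (fun x _ => by simp [pvIsId, Bool.and_comm])

-- ===== VERDICT (by name: the statement is the Claim_ definition above) =====
theorem parse_encoded_string_spec : Claim_equal_parse_encoded_string := by
  intro s _
  unfold Spec_parse_encoded_string parse_encoded_string parse_encoded_string_alt
  simp only []
  rw [pvFoldA_spec, pvNames_eq, pvIds_eq, if_pos rfl, if_pos rfl, pvTail_getLastD]
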